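-- pv_equiv track=rewrite | github.com/khnhk0ogei04/Sokoban_AI | support_function.py | find_list_checkpoint
-- ===== SOURCE A (Python) =====
-- def find_list_checkpoint(board):
--     list_check_point = []
--     num_of_boxes = 0
--     for x in range (len(board)):
--         for y in range (len(board[0])):
--             if board[x][y] == '$':
--                 num_of_boxes += 1
--             elif board[x][y] == '%':
--                 list_check_point.append((x, y))
--
--     if num_of_boxes < len(list_check_point):
--         return [(-1, -1)]
--     return list_check_point
-- ===== SOURCE B (Python) =====
-- def find_list_checkpoint(board):
--     boxes = 0
--     cps = []
--     for y, col in enumerate(zip(*board)):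
--         for x, c in enumerate(col):
--             if c == '$':
--                 boxes += 1
--             elif c == '%':
--                 cps.append((x, y))
--     if boxes < len(cps):
--         return [(-1, -1)]
--     return sorted(cps)
-- ===== Notes on version B (the rewrite author's own statement) =====
-- stated objective: alternative
-- what changed: B transposes the board with zip(*board) and scans it column-major, collecting checkpoints in column order and restoring row-major order with a final sorted(); A is a fused row-major double index loop with board[x][y] lookups. Pre_ excludes boards with a row shorter than the first row, on which A raises IndexError.
import Mathlib
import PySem

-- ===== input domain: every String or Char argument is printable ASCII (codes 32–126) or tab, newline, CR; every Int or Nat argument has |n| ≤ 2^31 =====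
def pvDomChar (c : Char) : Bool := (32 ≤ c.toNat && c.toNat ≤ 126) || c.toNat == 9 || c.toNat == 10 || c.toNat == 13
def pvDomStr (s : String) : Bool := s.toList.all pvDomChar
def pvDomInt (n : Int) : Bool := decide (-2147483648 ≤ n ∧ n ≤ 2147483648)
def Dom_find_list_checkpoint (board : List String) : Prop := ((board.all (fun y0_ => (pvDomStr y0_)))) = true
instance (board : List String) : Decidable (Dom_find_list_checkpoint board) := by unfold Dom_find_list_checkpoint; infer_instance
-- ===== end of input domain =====

-- B scans the transposed board (zip(*board)) column-major and restores row-major order of the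
-- checkpoints with a final sort; A is a fused row-major index loop. Alternative algorithm, same cost.

-- ===== PORT A =====
-- A: fused nested index loop over rows x then columns y (bounded by len(board[0])), two accumulators.
def find_list_checkpoint (board : List String) : List (Int × Int) :=
  let st :=
    (PySem.List.pyRange 0 (board.length : Int) 1).foldl
      (fun (st : List (Int × Int) × Int) x =>
        (PySem.List.pyRange 0 (((PySem.List.pyGetD board 0 "").toList.length : Int)) 1).foldl
          (fun (st : List (Int × Int) × Int) y =>
            let c := PySem.List.pyGetD (PySem.List.pyGetD board x "").toList y ' '
            if c = '$' then (st.1, st.2 + 1)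
            else if c = '%' then (st.1 ++ [(x, y)], st.2)
            else st)
          st)
      (([] : List (Int × Int)), (0 : Int))
  if st.2 < (st.1.length : Int) then [(-1, -1)] else st.1

-- ===== PORT B =====
-- zip(*board): columns, truncated to the shortest row (the default ' ' is never read: y < min length).
def pvZipStar (rows : List (List Char)) : List (List Char) :=
  match rows with
  | [] => []
  | r :: rs =>
    let m := rs.foldl (fun acc r' => min acc r'.length) r.length
    (List.range m).map (fun y => (r :: rs).map (fun row => row.getD y ' '))

def find_list_checkpoint_alt (board : List String) : List (Int × Int) :=
  let st :=
    (PySem.List.enumerate (pvZipStar (board.map String.toList)) 0).foldl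
      (fun (st : Int × List (Int × Int)) p =>
        (PySem.List.enumerate p.2 0).foldl
          (fun (st : Int × List (Int × Int)) q =>
            if q.2 = '$' then (st.1 + 1, st.2)
            else if q.2 = '%' then (st.1, st.2 ++ [(q.1, p.1)])
            else st)
          st)
      ((0 : Int), ([] : List (Int × Int)))
  if st.1 < (st.2.length : Int) then [(-1, -1)] else
    PySem.List.sorted2 st.2 (fun v => v.1) (fun v => v.2) false

-- ===== PRECONDITION & SPEC =====
-- Pre_: exactly where A returns normally — every row at least as long as row 0
-- (A indexes every row at columns 0..len(board[0])-1 and raises IndexError on a shorter row).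
def Pre_find_list_checkpoint (board : List String) : Prop :=
  ∀ r ∈ board, (board.headD "").toList.length ≤ r.toList.length
instance (board : List String) : Decidable (Pre_find_list_checkpoint board) := by
  unfold Pre_find_list_checkpoint; infer_instance

def pvWitness_find_list_checkpoint : List String := ["# $ %", "#  % "]

def Spec_find_list_checkpoint (board : List String) (out : List (Int × Int)) : Prop :=
  out = find_list_checkpoint_alt board
instance (board : List String) (out : List (Int × Int)) : Decidable (Spec_find_list_checkpoint board out) := by
  unfold Spec_find_list_checkpoint; infer_instance

-- ===== CLAIM (what is proved, stated in full; the proofs are below) =====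
def Claim_equal_find_list_checkpoint : Prop := ∀ (board : List String), Dom_find_list_checkpoint board → Pre_find_list_checkpoint board → Spec_find_list_checkpoint board (find_list_checkpoint board)

-- ===== LEMMAS AND PROOFS =====

-- the character of the board at row x, column y (default ' ' is never read inside the proved ranges)
def pvCell (board : List String) (x y : Nat) : Char :=
  ((board.getD x "").toList).getD y ' '

-- strict lexicographic order on Int pairs (Python's tuple order)
def pvLex (a b : Int × Int) : Prop := a.1 < b.1 ∨ (a.1 = b.1 ∧ a.2 < b.2)

-- -------- generic list lemmas --------

theorem pv_filter_map_eq_flatMap {α β : Type} (l : List α) (p : α → Bool) (f : α → β) :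
    (l.filter p).map f = l.flatMap (fun a => if p a then [f a] else []) := by
  induction l with
  | nil => rfl
  | cons a t ih =>
    by_cases h : p a = true <;> simp [h, ih]

theorem pv_flatMap_append_perm {α β : Type} (l : List α) (g h : α → List β) :
    (l.flatMap (fun a => g a ++ h a)).Perm (l.flatMap g ++ l.flatMap h) := by
  induction l with
  | nil => simp
  | cons a t ih =>
    simp only [List.flatMap_cons]
    refine (ih.append_left _).trans ?_
    simp only [List.append_assoc]
    exact (List.perm_append_comm_assoc (h a) (t.flatMap g) (t.flatMap h)).append_left (g a)

theorem pv_flatMap_swap {α : Type} (n m : Nat) (F : Nat → Nat → List α) :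
    ((List.range n).flatMap (fun x => (List.range m).flatMap (fun y => F x y))).Perm
      ((List.range m).flatMap (fun y => (List.range n).flatMap (fun x => F x y))) := by
  induction n with
  | zero => simp
  | succ k ih =>
    rw [List.range_succ]
    simp only [List.flatMap_append, List.flatMap_cons, List.flatMap_nil, List.append_nil]
    refine (ih.append_right _).trans ?_
    exact (pv_flatMap_append_perm (List.range m)
      (fun y => (List.range k).flatMap (fun x => F x y)) (fun y => F k y)).symm

-- -------- sorted2 with lexicographic keys: any strictly increasing rearrangement is the sort --------

theorem pv_before_iff (a b : Int × Int) :
    ((decide (a.1 < b.1) || (!decide (b.1 < a.1) && decide (a.2 < b.2))) = true) ↔ pvLex a b := by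
  unfold pvLex
  by_cases h1 : a.1 < b.1 <;> by_cases h2 : b.1 < a.1 <;> by_cases h3 : a.2 < b.2 <;>
    simp [h1, h2, h3] <;> omega

theorem pv_insertBy_pairwise (x : Int × Int) (acc : List (Int × Int))
    (h : acc.Pairwise (fun a b => ¬ pvLex b a)) :
    (PySem.List.insertBy (fun a b => decide (a.1 < b.1) || (!decide (b.1 < a.1) && decide (a.2 < b.2))) x acc).Pairwise
      (fun a b => ¬ pvLex b a) := by
  induction acc with
  | nil => simp [PySem.List.insertBy]
  | cons y ys ih =>
    rw [List.pairwise_cons] at h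
    obtain ⟨hy, hys⟩ := h
    by_cases hb : (decide (x.1 < y.1) || (!decide (y.1 < x.1) && decide (x.2 < y.2))) = true
    · rw [PySem.List.insertBy, if_pos hb]
      have hxy : pvLex x y := (pv_before_iff x y).1 hb
      refine List.pairwise_cons.2 ⟨?_, List.pairwise_cons.2 ⟨hy, hys⟩⟩
      intro z hz
      rcases List.mem_cons.1 hz with rfl | hz
      · unfold pvLex at hxy ⊢; omega
      · have := hy z hz
        unfold pvLex at hxy this ⊢; omega
    · rw [PySem.List.insertBy, if_neg hb]
      have hxy : ¬ pvLex x y := fun hc => hb ((pv_before_iff x y).2 hc)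
      refine List.pairwise_cons.2 ⟨?_, ih hys⟩
      intro z hz
      rcases (PySem.List.mem_insertBy _ _ _ _).1 hz with rfl | hz
      · exact hxy
      · exact hy z hz

theorem pv_foldl_insertBy_pairwise (xs : List (Int × Int)) :
    ∀ acc : List (Int × Int), acc.Pairwise (fun a b => ¬ pvLex b a) →
    (xs.foldl (fun acc x =>
        PySem.List.insertBy (fun a b => decide (a.1 < b.1) || (!decide (b.1 < a.1) && decide (a.2 < b.2))) x acc) acc).Pairwise
      (fun a b => ¬ pvLex b a) := by
  induction xs with
  | nil => intro acc h; exact h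
  | cons x t ih =>
    intro acc h
    exact ih _ (pv_insertBy_pairwise x acc h)

theorem pv_sorted2_eq (xs ys : List (Int × Int)) (hperm : ys.Perm xs)
    (hpw : ys.Pairwise pvLex) :
    PySem.List.sorted2 xs (fun v => v.1) (fun v => v.2) false = ys := by
  have hres : (PySem.List.sorted2 xs (fun v => v.1) (fun v => v.2) false).Pairwise
      (fun a b => ¬ pvLex b a) := by
    have := pv_foldl_insertBy_pairwise xs [] (by simp)
    simpa [PySem.List.sorted2] using this
  have hperm2 : (PySem.List.sorted2 xs (fun v => v.1) (fun v => v.2) false).Perm ys :=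
    (PySem.List.sorted2_perm xs _ _ false).trans hperm.symm
  have hys : ys.Pairwise (fun a b : Int × Int => ¬ pvLex b a) := by
    refine hpw.imp ?_
    intro a b hab
    unfold pvLex at *; omega
  exact List.Perm.eq_of_pairwise
    (fun a b _ _ h1 h2 => by unfold pvLex at h1 h2; ext <;> omega) hres hys hperm2

-- -------- enumerate / min-fold helpers --------

theorem pv_enum_map {α β : Type} (f : α → β) (l : List α) :
    ∀ s : Int, PySem.List.enumerate (l.map f) s = (PySem.List.enumerate l s).map (fun p => (p.1, f p.2)) := by
  induction l with
  | nil => intro s; simp [PySem.List.enumerate_nil]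
  | cons a t ih => intro s; simp [PySem.List.enumerate_cons, ih]

theorem pv_enum_eq_range {α : Type} (xs : List α) (d : α) :
    PySem.List.enumerate xs 0 = (List.range xs.length).map (fun k : Nat => ((k : Int), xs.getD k d)) := by
  rw [PySem.List.enumerate_eq_map_pyRange (d := d), PySem.List.pyRange_one]
  simp [List.map_map, Function.comp_def]

theorem pv_foldl_min (l : List (List Char)) (a : Nat) (h : ∀ r ∈ l, a ≤ r.length) :
    l.foldl (fun acc r' => min acc r'.length) a = a := by
  induction l with
  | nil => rfl
  | cons r t ih =>
    simp only [List.foldl_cons]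
    rw [min_eq_left (h r (by simp))]
    exact ih (fun r' hr' => h r' (by simp [hr']))

-- -------- A's state in index space --------

theorem pv_innerA (r : List Char) (m : Nat) (x : Int) (st : List (Int × Int) × Int) :
    (PySem.List.pyRange 0 (m : Int) 1).foldl
      (fun (st : List (Int × Int) × Int) y =>
        let c := PySem.List.pyGetD r y ' '
        if c = '$' then (st.1, st.2 + 1)
        else if c = '%' then (st.1 ++ [(x, y)], st.2)
        else st) st
    = (st.1 ++ ((List.range m).filter (fun y => r.getD y ' ' = '%')).map (fun y : Nat => (x, (y : Int))),
       st.2 + (((List.range m).countP (fun y => r.getD y ' ' = '$')) : Int)) := by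
  induction m with
  | zero => simp
  | succ m ih =>
    have hsplit : (((m : Nat) + 1 : Nat) : Int) = (m : Int) + 1 := by push_cast; ring
    rw [hsplit, PySem.List.pyRange_one_succ_right (by positivity), List.foldl_append, ih]
    simp only [List.foldl_cons, List.foldl_nil, PySem.List.pyGetD_natCast, List.range_succ,
      List.filter_append, List.countP_append, List.map_append, List.getD_eq_getElem?_getD]
    by_cases h1 : r[m]?.getD ' ' = '$'
    · have h2 : ¬ r[m]?.getD ' ' = '%' := by rw [h1]; decide
      simp [h1]
      omega
    · by_cases h2 : r[m]?.getD ' ' = '%'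
      · simp [h2, List.append_assoc]
      · simp [h1, h2]

theorem pv_stateA (board : List String) :
    (PySem.List.pyRange 0 (board.length : Int) 1).foldl
      (fun (st : List (Int × Int) × Int) x =>
        (PySem.List.pyRange 0 (((PySem.List.pyGetD board 0 "").toList.length : Int)) 1).foldl
          (fun (st : List (Int × Int) × Int) y =>
            let c := PySem.List.pyGetD (PySem.List.pyGetD board x "").toList y ' '
            if c = '$' then (st.1, st.2 + 1)
            else if c = '%' then (st.1 ++ [(x, y)], st.2)
            else st)
          st)
      (([] : List (Int × Int)), (0 : Int))
    = ((List.range board.length).flatMap (fun x =>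
          ((List.range (board.headD "").toList.length).filter (fun y => pvCell board x y = '%')).map
            (fun y : Nat => ((x : Int), (y : Int)))),
       (((List.range board.length).map (fun x =>
          (((List.range (board.headD "").toList.length).countP (fun y => pvCell board x y = '$')) : Int))).sum)) := by
  have hh : PySem.List.pyGetD board 0 "" = board.headD "" := by
    cases board <;> simp [PySem.List.pyGetD_zero]
  rw [hh, PySem.List.pyRange_one 0 (board.length : Int)]
  simp only [Int.sub_zero, Int.toNat_natCast, zero_add]
  rw [List.foldl_map]
  refine (PySem.List.foldl_congr_mem
    (g := fun (st : List (Int × Int) × Int) (k : Nat) =>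
      (st.1 ++ ((List.range (board.headD "").toList.length).filter
          (fun y => pvCell board k y = '%')).map (fun y : Nat => ((k : Int), (y : Int))),
       st.2 + (((List.range (board.headD "").toList.length).countP
          (fun y => pvCell board k y = '$')) : Int))) _ _ _ ?_).trans ?_
  · intro acc k _
    simp only [PySem.List.pyGetD_natCast]
    exact pv_innerA ((board.getD k "").toList) ((board.headD "").toList.length) (k : Int) acc
  · rw [PySem.List.foldl_prod_mk
      (f := fun (acc : List (Int × Int)) (k : Nat) =>
        acc ++ ((List.range (board.headD "").toList.length).filter
          (fun y => pvCell board k y = '%')).map (fun y : Nat => ((k : Int), (y : Int))))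
      (g := fun (acc : Int) (k : Nat) =>
        acc + (((List.range (board.headD "").toList.length).countP
          (fun y => pvCell board k y = '$')) : Int))]
    rw [PySem.List.foldl_append_eq_flatMap, PySem.List.foldl_add]
    simp

-- -------- B's state in index space --------

theorem pv_innerB (board : List String) (y : Nat) (n : Nat) (st : Int × List (Int × Int)) :
    (List.range n).foldl
      (fun (st : Int × List (Int × Int)) x =>
        if pvCell board x y = '$' then (st.1 + 1, st.2)
        else if pvCell board x y = '%' then (st.1, st.2 ++ [((x : Int), (y : Int))])
        else st) st
    = (st.1 + (((List.range n).countP (fun x => pvCell board x y = '$')) : Int),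
       st.2 ++ ((List.range n).filter (fun x => pvCell board x y = '%')).map
         (fun x : Nat => ((x : Int), (y : Int)))) := by
  induction n with
  | zero => simp
  | succ n ih =>
    rw [List.range_succ, List.foldl_append, ih]
    simp only [List.foldl_cons, List.foldl_nil,
      List.filter_append, List.countP_append]
    by_cases h1 : pvCell board n y = '$'
    · have h2 : ¬ pvCell board n y = '%' := by rw [h1]; decide
      simp [h1]
      omega
    · by_cases h2 : pvCell board n y = '%'
      · simp [h2, List.append_assoc]
      · simp [h1, h2]

theorem pv_stateB (board : List String) (hne : board ≠ [])
    (hPre : Pre_find_list_checkpoint board) :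
    (PySem.List.enumerate (pvZipStar (board.map String.toList)) 0).foldl
      (fun (st : Int × List (Int × Int)) p =>
        (PySem.List.enumerate p.2 0).foldl
          (fun (st : Int × List (Int × Int)) q =>
            if q.2 = '$' then (st.1 + 1, st.2)
            else if q.2 = '%' then (st.1, st.2 ++ [(q.1, p.1)])
            else st)
          st)
      ((0 : Int), ([] : List (Int × Int)))
    = ((((List.range (board.headD "").toList.length).map (fun y =>
          (((List.range board.length).countP (fun x => pvCell board x y = '$')) : Int))).sum),
       (List.range (board.headD "").toList.length).flatMap (fun y =>
          ((List.range board.length).filter (fun x => pvCell board x y = '%')).map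
            (fun x : Nat => ((x : Int), (y : Int))))) := by
  obtain ⟨r0, rest, rfl⟩ : ∃ r0 rest, board = r0 :: rest := by
    cases board with
    | nil => exact absurd rfl hne
    | cons a t => exact ⟨a, t, rfl⟩
  have hmin : (rest.map String.toList).foldl (fun acc r' => min acc r'.length) r0.toList.length
      = r0.toList.length := by
    refine pv_foldl_min _ _ ?_
    intro r hr
    obtain ⟨sr, hsr, rfl⟩ := List.mem_map.1 hr
    simpa using hPre sr (List.mem_cons_of_mem _ hsr)
  have hcols : pvZipStar ((r0 :: rest).map String.toList)
      = (List.range ((r0 :: rest).headD "").toList.length).map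
          (fun y => ((r0 :: rest).map String.toList).map (fun row => row.getD y ' ')) := by
    simp only [List.map_cons, pvZipStar, hmin, List.headD_cons]
  rw [hcols]
  rw [pv_enum_map, pv_enum_eq_range (List.range ((r0 :: rest).headD "").toList.length) 0]
  rw [List.map_map, List.foldl_map]
  refine (PySem.List.foldl_congr_mem _ _
    (g := fun (st : Int × List (Int × Int)) (y : Nat) =>
      (st.1 + (((List.range (r0 :: rest).length).countP
          (fun x => pvCell (r0 :: rest) x y = '$')) : Int),
       st.2 ++ ((List.range (r0 :: rest).length).filter
          (fun x => pvCell (r0 :: rest) x y = '%')).map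
            (fun x : Nat => ((x : Int), (y : Int))))) _ ?_).trans ?_
  · intro acc y hy
    have hyM : y < ((r0 :: rest).headD "").toList.length := by simpa using hy
    have hgy : (List.range ((r0 :: rest).headD "").toList.length).getD y 0 = y := by
      have hy' : y < r0.length := by simpa using hyM
      simp [List.getD_eq_getElem?_getD, List.getElem?_range hy']
    simp only [Function.comp_def, hgy]
    rw [pv_enum_map, pv_enum_map, pv_enum_eq_range (r0 :: rest) ""]
    rw [List.map_map, List.map_map, List.foldl_map]
    exact pv_innerB (r0 :: rest) y (r0 :: rest).length acc
  · rw [PySem.List.foldl_prod_mk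
      (f := fun (acc : Int) (y : Nat) =>
        acc + (((List.range (r0 :: rest).length).countP
          (fun x => pvCell (r0 :: rest) x y = '$')) : Int))
      (g := fun (acc : List (Int × Int)) (y : Nat) =>
        acc ++ ((List.range (r0 :: rest).length).filter
          (fun x => pvCell (r0 :: rest) x y = '%')).map
            (fun x : Nat => ((x : Int), (y : Int))))]
    rw [PySem.List.foldl_append_eq_flatMap, PySem.List.foldl_add]
    simp

-- -------- the two states agree --------

theorem pv_perm (board : List String) (c : Char) :
    ((List.range board.length).flatMap (fun x =>
        ((List.range (board.headD "").toList.length).filter (fun y => pvCell board x y = c)).map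
          (fun y : Nat => ((x : Int), (y : Int))))).Perm
      ((List.range (board.headD "").toList.length).flatMap (fun y =>
        ((List.range board.length).filter (fun x => pvCell board x y = c)).map
          (fun x : Nat => ((x : Int), (y : Int))))) := by
  refine ((List.Perm.of_eq (List.flatMap_congr (fun x _ =>
      pv_filter_map_eq_flatMap (List.range (board.headD "").toList.length)
        (fun y => decide (pvCell board x y = c)) (fun y : Nat => ((x : Int), (y : Int)))))).trans
    ?_).trans
    (List.Perm.of_eq (List.flatMap_congr (fun y _ =>
      (pv_filter_map_eq_flatMap (List.range board.length)
        (fun x => decide (pvCell board x y = c)) (fun x : Nat => ((x : Int), (y : Int)))).symm)))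
  exact pv_flatMap_swap board.length ((board.headD "").toList.length)
    (fun x y => if decide (pvCell board x y = c) = true then [((x : Int), (y : Int))] else [])

theorem pv_sum_eq (board : List String) (c : Char) :
    (((List.range board.length).map (fun x =>
        (((List.range (board.headD "").toList.length).countP (fun y => pvCell board x y = c)) : Int))).sum)
    = (((List.range (board.headD "").toList.length).map (fun y =>
        (((List.range board.length).countP (fun x => pvCell board x y = c)) : Int))).sum) := by
  have cast_sum : ∀ (l : List Nat) (g : Nat → Nat),
      ((l.map (fun a => ((g a : Nat) : Int))).sum) = (((l.map g).sum : Nat) : Int) := by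
    intro l g; rw [Nat.cast_list_sum, List.map_map]; rfl
  rw [cast_sum _ (fun x => (List.range (board.headD "").toList.length).countP
        (fun y => pvCell board x y = c)),
      cast_sum _ (fun y => (List.range board.length).countP (fun x => pvCell board x y = c))]
  congr 1
  have hA : ((List.range board.length).map (fun x =>
      (List.range (board.headD "").toList.length).countP (fun y => pvCell board x y = c))).sum
      = ((List.range board.length).flatMap (fun x =>
          ((List.range (board.headD "").toList.length).filter (fun y => pvCell board x y = c)).map
            (fun y : Nat => ((x : Int), (y : Int))))).length := by
    simp [List.length_flatMap, List.countP_eq_length_filter]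
  have hB : ((List.range (board.headD "").toList.length).map (fun y =>
      (List.range board.length).countP (fun x => pvCell board x y = c))).sum
      = ((List.range (board.headD "").toList.length).flatMap (fun y =>
          ((List.range board.length).filter (fun x => pvCell board x y = c)).map
            (fun x : Nat => ((x : Int), (y : Int))))).length := by
    simp [List.length_flatMap, List.countP_eq_length_filter]
  rw [hA, hB]
  exact (pv_perm board c).length_eq

theorem pv_pairwise_A (board : List String) :
    ((List.range board.length).flatMap (fun x =>
        ((List.range (board.headD "").toList.length).filter (fun y => pvCell board x y = '%')).map
          (fun y : Nat => ((x : Int), (y : Int))))).Pairwise pvLex := by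
  rw [List.flatMap_def, List.pairwise_flatten]
  constructor
  · intro l hl
    obtain ⟨x, hx, rfl⟩ := List.mem_map.1 hl
    refine List.Pairwise.map _ ?_ (List.pairwise_lt_range.filter _)
    intro a b hab
    exact Or.inr ⟨rfl, by simpa using hab⟩
  · refine List.Pairwise.map _ ?_ List.pairwise_lt_range
    intro x x' hxx a ha b hb
    obtain ⟨ya, hya, rfl⟩ := List.mem_map.1 ha
    obtain ⟨yb, hyb, rfl⟩ := List.mem_map.1 hb
    exact Or.inl (by simpa using hxx)

-- ===== VERDICT (by name: the statement is the Claim_ definition above) =====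
theorem find_list_checkpoint_spec : Claim_equal_find_list_checkpoint := by
  intro board _ hPre
  unfold Spec_find_list_checkpoint
  cases board with
  | nil => decide
  | cons r0 rest =>
    simp only [find_list_checkpoint, find_list_checkpoint_alt]
    rw [pv_stateA (r0 :: rest), pv_stateB (r0 :: rest) (by simp) hPre]
    have hsort : PySem.List.sorted2
        ((List.range ((r0 :: rest).headD "").toList.length).flatMap (fun y =>
          ((List.range (r0 :: rest).length).filter (fun x => pvCell (r0 :: rest) x y = '%')).map
            (fun x : Nat => ((x : Int), (y : Int)))))
        (fun v => v.1) (fun v => v.2) false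
        = ((List.range (r0 :: rest).length).flatMap (fun x =>
          ((List.range ((r0 :: rest).headD "").toList.length).filter
            (fun y => pvCell (r0 :: rest) x y = '%')).map
            (fun y : Nat => ((x : Int), (y : Int))))) :=
      pv_sorted2_eq _ _ (pv_perm (r0 :: rest) '%') (pv_pairwise_A (r0 :: rest))
    simp only [hsort, pv_sum_eq (r0 :: rest) '$', (pv_perm (r0 :: rest) '%').length_eq]
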